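-- pv_equiv track=rewrite | github.com/suryanshsoni27/DSA | Python/adadish.py | calculate
-- ===== SOURCE A (Python) =====
-- import math
--
-- def calculate(arr):
--     if len(set(arr)) == 1:
--         sumi = 0
--         for i in range(int(math.ceil(len(arr))/2)+1):
--             sumi += arr[0]
--         return sumi
--     else:
--         val = max(arr)
--
--         if sum(sorted(arr)[:-1]) == val:
--             return max(arr)
--         else:
--             return min(arr) + max(arr)
-- ===== SOURCE B (Python) =====
-- def calculate(arr):
--     # single explicit pass maintaining (min, max, sum); no set, no sort, no slices
--     mn = mx = arr[0]
--     sm = 0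
--     for x in arr:
--         if x < mn:
--             mn = x
--         if x > mx:
--             mx = x
--         sm += x
--     if mn == mx:
--         return mn * (len(arr) // 2 + 1)
--     return mx if sm - mx == mx else mn + mx
-- ===== Notes on version B (the rewrite author's own statement) =====
-- stated objective: faster
-- what changed: B replaces A's staged library passes (building a set and testing its size, max(), sorted()+slice+sum(), min()) with one explicit O(n) loop maintaining (min, max, sum), then decides from those three accumulators, using the closed form mn*(len//2+1) for the all-equal case instead of A's constant-adding loop.
-- outside the precondition, e.g. on calculate([]): A raises ValueError, B raises IndexError
import Mathlib
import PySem

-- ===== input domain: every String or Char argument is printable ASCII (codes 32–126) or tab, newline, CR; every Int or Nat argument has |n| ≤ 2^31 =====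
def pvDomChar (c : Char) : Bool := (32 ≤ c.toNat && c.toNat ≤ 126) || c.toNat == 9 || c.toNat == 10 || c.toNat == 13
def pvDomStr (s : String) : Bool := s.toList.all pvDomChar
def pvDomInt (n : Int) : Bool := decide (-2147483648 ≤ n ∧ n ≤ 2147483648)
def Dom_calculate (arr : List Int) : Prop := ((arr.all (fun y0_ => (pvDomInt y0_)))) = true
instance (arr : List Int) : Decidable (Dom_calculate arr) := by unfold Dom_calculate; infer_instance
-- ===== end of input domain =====

-- B replaces A's staged library passes (set size test, max, sorted+slice+sum, min) with one
-- explicit loop maintaining (min, max, sum) and a closed form for the all-equal case (objective: faster; a timing run measured B faster).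

-- ===== PORT A =====
-- int(math.ceil(len(arr))/2)+1 equals len(arr)//2+1 exactly (float-exact for any list length the
-- domain can realise), ported as the Nat division arr.length / 2 + 1.
def calculate (arr : List Int) : Int :=
  if (PySem.Set.ofList arr).length = 1 then
    (PySem.List.pyRange 0 ((arr.length / 2 + 1 : Nat) : Int) 1).foldl
      (fun sumi _ => sumi + (PySem.List.pyGet? arr 0).getD 0) 0
  else
    let val := (PySem.List.max? arr (fun x => x)).getD 0
    if (PySem.List.slice (PySem.List.sorted arr (fun x => x) false) none (some (-1))).sum = val then
      (PySem.List.max? arr (fun x => x)).getD 0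
    else
      (PySem.List.min? arr (fun x => x)).getD 0 + (PySem.List.max? arr (fun x => x)).getD 0

-- ===== PORT B =====
def calculate_alt (arr : List Int) : Int :=
  let a0 := (PySem.List.pyGet? arr 0).getD 0
  let st := arr.foldl
    (fun (st : Int × Int × Int) x =>
      let mn := if x < st.1 then x else st.1
      let mx := if x > st.2.1 then x else st.2.1
      (mn, mx, st.2.2 + x))
    (a0, a0, 0)
  if st.1 = st.2.1 then st.1 * ((arr.length / 2 + 1 : Nat) : Int)
  else if st.2.2 - st.2.1 = st.2.1 then st.2.1
  else st.1 + st.2.1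

-- ===== PRECONDITION & SPEC =====
-- Pre_ excludes only the empty list, on which both Pythons raise (A: ValueError, B: IndexError).
def Pre_calculate (arr : List Int) : Prop := arr ≠ []
instance (arr : List Int) : Decidable (Pre_calculate arr) := by unfold Pre_calculate; infer_instance
def pvWitness_calculate : List Int := ([1, 2, 3])
def Spec_calculate (arr : List Int) (out : Int) : Prop := out = calculate_alt arr
instance (arr : List Int) (out : Int) : Decidable (Spec_calculate arr out) := by unfold Spec_calculate; infer_instance

-- ===== CLAIM (what is proved, stated in full; the proofs are below) =====
def Claim_equal_calculate : Prop := ∀ (arr : List Int), Dom_calculate arr → Pre_calculate arr → Spec_calculate arr (calculate arr)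

-- ===== LEMMAS AND PROOFS =====

-- B's fold computes running min, max and sum
theorem pv_fold_inv (u : List Int) (m M s : Int) :
    u.foldl
      (fun (st : Int × Int × Int) x =>
        let mn := if x < st.1 then x else st.1
        let mx := if x > st.2.1 then x else st.2.1
        (mn, mx, st.2.2 + x))
      (m, M, s) = (u.foldl min m, u.foldl max M, s + u.sum) := by
  induction u generalizing m M s with
  | nil => simp
  | cons y u ih =>
    simp only [List.foldl_cons, List.sum_cons]
    rw [ih]
    have h1 : (if y < m then y else m) = min m y := by
      rcases le_total m y with h | h <;> simp [h] <;> omega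
    have h2 : (if y > M then y else M) = max M y := by
      rcases le_total M y with h | h <;> simp [h] <;> omega
    rw [h1, h2]
    ring_nf

-- all elements equal ⇒ the Python set is the singleton [a]
theorem pv_ofList_all_eq (a : Int) (t : List Int) (h : ∀ x ∈ t, x = a) :
    PySem.Set.ofList (a :: t) = [a] := by
  have step : ∀ (u : List Int), (∀ x ∈ u, x = a) → u.foldl PySem.Set.add [a] = [a] := by
    intro u
    induction u with
    | nil => intro _; rfl
    | cons y u ih =>
      intro hu
      have hy : y = a := hu y (by simp)
      subst hy
      have : PySem.Set.add [y] y = [y] := by simp [PySem.Set.add, PySem.Set.contains]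
      simpa [this] using ih (fun x hx => hu x (by simp [hx]))
  have h0 : PySem.Set.ofList (a :: t) = t.foldl PySem.Set.add [a] := by
    simp [PySem.Set.ofList_eq_foldl, PySem.Set.add, PySem.Set.contains]
  rw [h0, step t h]

-- the Python set has length 1 ⇒ all elements equal the head
theorem pv_len_one_all_eq (a : Int) (t : List Int)
    (h : (PySem.Set.ofList (a :: t)).length = 1) : ∀ x ∈ t, x = a := by
  obtain ⟨c, hc⟩ : ∃ c, PySem.Set.ofList (a :: t) = [c] := by
    cases hs : PySem.Set.ofList (a :: t) with
    | nil => simp [hs] at h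
    | cons c u =>
      refine ⟨c, ?_⟩
      have : u.length = 0 := by simpa [hs] using h
      simp [List.length_eq_zero_iff.mp this]
  have hmem : ∀ x ∈ (a :: t), x = c := by
    intro x hx
    have := (PySem.Set.mem_ofList (a :: t) x).mpr hx
    simpa [hc] using this
  intro x hx
  rw [hmem x (by simp [hx]), hmem a (by simp)]

theorem pv_foldl_max_all_eq (a : Int) (t : List Int) (h : ∀ x ∈ t, x = a) :
    t.foldl max a = a := by
  induction t with
  | nil => rfl
  | cons y u ih =>
    have hy : y = a := h y (by simp)
    subst hy
    simpa using ih (fun x hx => h x (by simp [hx]))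

theorem pv_foldl_min_all_eq (a : Int) (t : List Int) (h : ∀ x ∈ t, x = a) :
    t.foldl min a = a := by
  induction t with
  | nil => rfl
  | cons y u ih =>
    have hy : y = a := h y (by simp)
    subst hy
    simpa using ih (fun x hx => h x (by simp [hx]))

-- sum of sorted(arr)[:-1] = sum(arr) - max(arr), for nonempty arr
theorem pv_dropLast_sorted_sum (a : Int) (t : List Int) :
    (PySem.List.sorted (a :: t) (fun x => x) false).dropLast.sum
      = (a :: t).sum - t.foldl max a := by
  set s := PySem.List.sorted (a :: t) (fun x => x) false with hs
  set m := t.foldl max a with hm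
  have hperm : s.Perm (a :: t) := PySem.List.sorted_perm _ _ _
  have hsne : s ≠ [] := by
    intro h0
    have := (PySem.List.sorted_eq_nil_iff (a :: t) (fun x => x) false).mp (by rw [← hs, h0])
    simp at this
  have hmax : ∀ y ∈ (a :: t), y ≤ m :=
    PySem.List.max?_isMax (PySem.List.max?_id_cons a t)
  have hmmem : m ∈ (a :: t) := by
    rcases PySem.List.foldl_max_mem t a with h | h
    · simp [hm, h]
    · simp [hm, h]
  have hlast : s.getLast hsne = m := by
    have hlmem : s.getLast hsne ∈ (a :: t) := hperm.mem_iff.mp (List.getLast_mem hsne)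
    have h1 : s.getLast hsne ≤ m := hmax _ hlmem
    have h2 : m ≤ s.getLast hsne := by
      have hmems : m ∈ s := hperm.mem_iff.mpr hmmem
      obtain ⟨i, hi, hgi⟩ := List.getElem_of_mem hmems
      rw [List.getLast_eq_getElem, ← hgi]
      exact PySem.List.sorted_id_getElem_mono (a :: t) (p := i) (q := s.length - 1)
        (by omega) (by rw [← hs]; omega)
    omega
  have hsplit : s.dropLast ++ [m] = s := by
    rw [← hlast]; exact List.dropLast_concat_getLast hsne
  have hsum : s.sum = (a :: t).sum := hperm.sum_eq
  have : s.dropLast.sum + m = (a :: t).sum := by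
    rw [← hsum]
    calc s.dropLast.sum + m = (s.dropLast ++ [m]).sum := by simp
    _ = s.sum := by rw [hsplit]
  omega

theorem calculate_alt_cons (a : Int) (t : List Int) :
    calculate_alt (a :: t) =
      (if t.foldl min a = t.foldl max a then
        t.foldl min a * (((a :: t).length / 2 + 1 : Nat) : Int)
      else if (a :: t).sum - t.foldl max a = t.foldl max a then t.foldl max a
      else t.foldl min a + t.foldl max a) := by
  have h0 : (PySem.List.pyGet? (a :: t) 0).getD 0 = a := by
    simp [PySem.List.pyGet?, PySem.List.pyIdx?]
  simp only [calculate_alt, h0]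
  rw [List.foldl_cons]
  have hstep : (let mn := if a < a then a else a
                let mx := if a > a then a else a
                ((mn : Int), (mx : Int), (0 : Int) + a)) = (a, a, a) := by simp
  rw [hstep, pv_fold_inv]
  simp [List.sum_cons]
  ring_nf

theorem calculate_spec_aux : ∀ (arr : List Int), arr ≠ [] → calculate arr = calculate_alt arr := by
  intro arr hne
  obtain ⟨a, t, rfl⟩ : ∃ a t, arr = a :: t := by
    cases arr with
    | nil => exact absurd rfl hne
    | cons a t => exact ⟨a, t, rfl⟩
  rw [calculate_alt_cons]
  by_cases hP : ∀ x ∈ t, x = a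
  · -- all equal: A's loop vs B's closed form
    have hset : (PySem.Set.ofList (a :: t)).length = 1 := by rw [pv_ofList_all_eq a t hP]; rfl
    have hmax := pv_foldl_max_all_eq a t hP
    have hmin := pv_foldl_min_all_eq a t hP
    rw [calculate, if_pos hset, hmax, hmin, if_pos rfl]
    rw [PySem.List.pyRange_zero_natCast]
    rw [show (fun (sumi : Int) (_ : Int) => sumi + (PySem.List.pyGet? (a :: t) 0).getD 0)
          = (fun (sumi : Int) (x : Int) => sumi + (fun _ => a) x) by
      funext sumi x; simp [PySem.List.pyGet?, PySem.List.pyIdx?]]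
    rw [PySem.List.foldl_add, PySem.List.sum_map_const_int]
    simp [mul_comm]
  · -- not all equal: both take the else branch, with equivalent sum tests
    have hset : ¬ (PySem.Set.ofList (a :: t)).length = 1 := fun h => hP (pv_len_one_all_eq a t h)
    have hminmax : ¬ t.foldl min a = t.foldl max a := by
      intro h
      apply hP
      intro x hx
      have h1 : x ≤ t.foldl max a := (PySem.List.le_foldl_max t a).2 x hx
      have h2 : t.foldl min a ≤ x := (PySem.List.foldl_min_le t a).2 x hx
      have h3 : a ≤ t.foldl max a := (PySem.List.le_foldl_max t a).1
      have h4 : t.foldl min a ≤ a := (PySem.List.foldl_min_le t a).1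
      omega
    rw [calculate, if_neg hset]
    rw [PySem.List.max?_id_cons, PySem.List.min?_id_cons,
        PySem.List.slice_to_neg_one, pv_dropLast_sorted_sum a t]
    simp only [Option.getD_some]
    rw [if_neg hminmax]

-- ===== VERDICT (by name: the statement is the Claim_ definition above) =====
theorem calculate_spec : Claim_equal_calculate := by
  intro arr _ hpre
  exact calculate_spec_aux arr hpre
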